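-- pv_equiv track=rewrite | github.com/abyssonym/beyondchaos | wor.py | _dir_to_camera_moves
-- ===== SOURCE A (Python) =====
-- def _dir_to_camera_moves(dir):
--     x = dir[0]
--     y = dir[1]
--
--     left = x < 0
--     down = y < 0
--     if left:
--         x = -x
--     if down:
--         y = -y
--     out = []
--
--     while x != 0 and y != 0:
--         if x == y:
--             diag = 0xA0
--             if left:
--                 diag += 2
--             if down != left:
--                 diag += 1
--             out.append(diag)
--             x -= 1
--             y -= 1
--         else:
--             if x > y:
--                 diag = 0xA5
--                 if left:
--                     diag += 4
--                 if down != left: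
--                     diag += 1
--                 out.append(diag)
--                 x -= 2
--                 y -= 1
--             else:
--                 diag = 0xA4
--                 if left:
--                     diag += 4
--                 if down != left:
--                     diag += 3
--                 out.append(diag)
--                 x -= 1
--                 y -= 2
--
--     if x == 0 and y == 0:
--         return out
--
--     if x != 0:
--         dir_add = 3 if left else 1
--         dist = x
--     else:
--         dir_add = 2 if down else 0
--         dist = y
--     ortho = 0x80 + (dist << 2) + dir_add
--     out.append(ortho)
--
--     return out
-- ===== SOURCE B (Python) =====
-- def _dir_to_camera_moves(dir):
--     x, y = dir
--     left = x < 0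
--     down = y < 0
--     a, b = abs(x), abs(y)
--     m, d = min(a, b), abs(a - b)
--     xor = 1 if down != left else 0
--     if a > b:
--         out = [0xA5 + (4 if left else 0) + xor] * min(d, m)
--     elif a < b:
--         out = [0xA4 + (4 if left else 0) + 3 * xor] * min(d, m)
--     else:
--         out = []
--     if d <= m:
--         out += [0xA0 + (2 if left else 0) + xor] * (m - d)
--     else:
--         dir_add = (3 if left else 1) if a > b else (2 if down else 0)
--         out.append(0x80 + ((d - m) << 2) + dir_add)
--     return out
-- ===== Notes on version B (the rewrite author's own statement) =====
-- stated objective: faster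
-- what changed: Replaces A's one-byte-per-iteration while loop with a closed-form computation: the counts of lean and diagonal bytes (min(|dx|,d) and the leftover) are computed arithmetically and the output is built with list replication, plus one orthogonal byte for the remainder.
import Mathlib
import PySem

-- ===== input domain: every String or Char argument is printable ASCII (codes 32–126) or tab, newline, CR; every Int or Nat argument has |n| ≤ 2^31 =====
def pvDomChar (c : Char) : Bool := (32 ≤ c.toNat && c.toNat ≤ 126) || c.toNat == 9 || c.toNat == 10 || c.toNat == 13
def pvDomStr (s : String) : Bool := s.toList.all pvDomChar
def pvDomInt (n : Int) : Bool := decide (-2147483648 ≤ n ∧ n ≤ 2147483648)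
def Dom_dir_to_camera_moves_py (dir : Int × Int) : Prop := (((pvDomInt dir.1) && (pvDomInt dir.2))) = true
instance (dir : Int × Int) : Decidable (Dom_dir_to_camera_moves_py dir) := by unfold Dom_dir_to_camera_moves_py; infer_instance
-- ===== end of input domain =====

-- B replaces A's one-byte-per-iteration loop by a closed-form construction
-- (counts of lean/diagonal bytes computed arithmetically, lists built with replication);
-- objective: faster (constant-factor: no per-step Python loop).

-- ===== PORT A =====
-- A's while loop; x, y are the absolute values (always nonnegative in Python too),
-- the loop returns the final (x, y, out) triple used by the code after the loop.
def dirCamLoop (left down : Bool) (x y : Nat) (out : List Int) : Nat × Nat × List Int :=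
  if h : x ≠ 0 ∧ y ≠ 0 then
    if x = y then
      dirCamLoop left down (x - 1) (y - 1)
        (out ++ [0xA0 + (if left then 2 else 0) + (if down != left then 1 else 0)])
    else if x > y then
      dirCamLoop left down (x - 2) (y - 1)
        (out ++ [0xA5 + (if left then 4 else 0) + (if down != left then 1 else 0)])
    else
      dirCamLoop left down (x - 1) (y - 2)
        (out ++ [0xA4 + (if left then 4 else 0) + (if down != left then 3 else 0)])
  else (x, y, out)
termination_by x + y
decreasing_by all_goals omega

def dir_to_camera_moves_py (dir : Int × Int) : List Int :=
  let left : Bool := decide (dir.1 < 0)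
  let down : Bool := decide (dir.2 < 0)
  -- `x = -x if left` / `y = -y if down` makes both nonnegative: natAbs
  let r := dirCamLoop left down dir.1.natAbs dir.2.natAbs []
  if r.1 = 0 ∧ r.2.1 = 0 then r.2.2
  else if r.1 ≠ 0 then
    r.2.2 ++ [0x80 + ((r.1 <<< 2 : Nat) : Int) + (if left then 3 else 1)]
  else
    r.2.2 ++ [0x80 + ((r.2.1 <<< 2 : Nat) : Int) + (if down then 2 else 0)]

-- ===== PORT B =====
def dir_to_camera_moves_py_alt (dir : Int × Int) : List Int :=
  let left : Bool := decide (dir.1 < 0)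
  let down : Bool := decide (dir.2 < 0)
  let a := dir.1.natAbs
  let b := dir.2.natAbs
  let m := min a b
  let d := ((a : Int) - (b : Int)).natAbs
  let xor : Int := if down != left then 1 else 0
  let out : List Int :=
    if a > b then List.replicate (min d m) (0xA5 + (if left then 4 else 0) + xor)
    else if a < b then List.replicate (min d m) (0xA4 + (if left then 4 else 0) + 3 * xor)
    else []
  if d ≤ m then
    out ++ List.replicate (m - d) (0xA0 + (if left then 2 else 0) + xor)
  else
    out ++ [0x80 + (((d - m) <<< 2 : Nat) : Int) +
      (if a > b then (if left then 3 else 1) else (if down then 2 else 0))]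

-- ===== PRECONDITION & SPEC =====
def Spec_dir_to_camera_moves_py (dir : Int × Int) (out : List Int) : Prop := out = dir_to_camera_moves_py_alt dir
instance (dir : Int × Int) (out : List Int) : Decidable (Spec_dir_to_camera_moves_py dir out) := by unfold Spec_dir_to_camera_moves_py; infer_instance

-- ===== CLAIM (what is proved, stated in full; the proofs are below) =====
def Claim_equal_dir_to_camera_moves_py : Prop := ∀ (dir : Int × Int), Dom_dir_to_camera_moves_py dir → Spec_dir_to_camera_moves_py dir (dir_to_camera_moves_py dir)

-- ===== LEMMAS AND PROOFS =====

-- byte abbreviations (proof-only)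
def dB (l dn : Bool) : Int := 0xA0 + (if l then 2 else 0) + (if dn != l then 1 else 0)
def lxB (l dn : Bool) : Int := 0xA5 + (if l then 4 else 0) + (if dn != l then 1 else 0)
def lyB (l dn : Bool) : Int := 0xA4 + (if l then 4 else 0) + (if dn != l then 3 else 0)

-- closed form of the loop result
def G (l dn : Bool) (x y : Nat) (out : List Int) : Nat × Nat × List Int :=
  if x > y then
    (if x - y ≤ y then
      (0, 0, out ++ List.replicate (x - y) (lxB l dn) ++ List.replicate (y - (x - y)) (dB l dn))
     else (x - 2 * y, 0, out ++ List.replicate y (lxB l dn)))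
  else if x < y then
    (if y - x ≤ x then
      (0, 0, out ++ List.replicate (y - x) (lyB l dn) ++ List.replicate (x - (y - x)) (dB l dn))
     else (0, y - 2 * x, out ++ List.replicate x (lyB l dn)))
  else (0, 0, out ++ List.replicate x (dB l dn))

lemma G_eq (l dn : Bool) {x y : Nat} (h : x = y) (out : List Int) :
    G l dn x y out = (0, 0, out ++ List.replicate x (dB l dn)) := by
  subst h; unfold G
  rw [if_neg (show ¬ x > x by omega), if_neg (show ¬ x < x by omega)]

lemma G_gt (l dn : Bool) {x y : Nat} (h1 : x > y) (h2 : x - y ≤ y) (out : List Int) :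
    G l dn x y out
      = (0, 0, out ++ List.replicate (x - y) (lxB l dn) ++ List.replicate (y - (x - y)) (dB l dn)) := by
  unfold G; rw [if_pos h1, if_pos h2]

lemma G_gt' (l dn : Bool) {x y : Nat} (h1 : x > y) (h2 : ¬ x - y ≤ y) (out : List Int) :
    G l dn x y out = (x - 2 * y, 0, out ++ List.replicate y (lxB l dn)) := by
  unfold G; rw [if_pos h1, if_neg h2]

lemma G_lt (l dn : Bool) {x y : Nat} (h1 : x < y) (h2 : y - x ≤ x) (out : List Int) :
    G l dn x y out
      = (0, 0, out ++ List.replicate (y - x) (lyB l dn) ++ List.replicate (x - (y - x)) (dB l dn)) := by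
  unfold G; rw [if_neg (show ¬ x > y by omega), if_pos h1, if_pos h2]

lemma G_lt' (l dn : Bool) {x y : Nat} (h1 : x < y) (h2 : ¬ y - x ≤ x) (out : List Int) :
    G l dn x y out = (0, y - 2 * x, out ++ List.replicate x (lyB l dn)) := by
  unfold G; rw [if_neg (show ¬ x > y by omega), if_pos h1, if_neg h2]

lemma cons_replicate (a : Int) (k : Nat) (out : List Int) :
    (out ++ [a]) ++ List.replicate k a = out ++ List.replicate (k + 1) a := by
  simp [List.replicate_succ]

lemma dirCamLoop_eq (l dn : Bool) (n x y : Nat) (hn : x + y ≤ n) (out : List Int) :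
    dirCamLoop l dn x y out = G l dn x y out := by
  induction n generalizing x y out with
  | zero =>
    have hx : x = 0 := by omega
    have hy : y = 0 := by omega
    subst hx; subst hy
    rw [dirCamLoop, G_eq l dn rfl]; simp
  | succ n ih =>
    rw [dirCamLoop]
    by_cases h : x ≠ 0 ∧ y ≠ 0
    · simp only [dif_pos h]
      obtain ⟨hx0, hy0⟩ := h
      by_cases hxy : x = y
      · subst hxy
        rw [if_pos rfl,
            show ([0xA0 + (if l then 2 else 0) + (if dn != l then 1 else 0)] : List Int)
              = [dB l dn] from rfl,
            ih _ _ (by omega), G_eq l dn rfl, G_eq l dn rfl, cons_replicate,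
            show x - 1 + 1 = x by omega]
      · rw [if_neg hxy]
        by_cases hgt : x > y
        · rw [if_pos hgt,
              show ([0xA5 + (if l then 4 else 0) + (if dn != l then 1 else 0)] : List Int)
                = [lxB l dn] from rfl,
              ih _ _ (by omega)]
          by_cases hle : x - y ≤ y
          · rw [G_gt l dn hgt hle]
            by_cases h2 : x - 2 = y - 1
            · -- x = y + 1: successor state is on the diagonal
              rw [G_eq l dn h2, h2, show x - y = 1 by omega]
              rfl
            · rw [G_gt l dn (show x - 2 > y - 1 by omega)
                    (show x - 2 - (y - 1) ≤ y - 1 by omega),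
                  show x - 2 - (y - 1) = x - y - 1 by omega,
                  show y - 1 - (x - y - 1) = y - (x - y) by omega,
                  cons_replicate, show x - y - 1 + 1 = x - y by omega]
          · rw [G_gt' l dn hgt hle,
                G_gt' l dn (show x - 2 > y - 1 by omega)
                  (show ¬ x - 2 - (y - 1) ≤ y - 1 by omega),
                show x - 2 - 2 * (y - 1) = x - 2 * y by omega,
                cons_replicate, show y - 1 + 1 = y by omega]
        · have hlt : x < y := by omega
          rw [if_neg (show ¬ x > y by omega),
              show ([0xA4 + (if l then 4 else 0) + (if dn != l then 3 else 0)] : List Int)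
                = [lyB l dn] from rfl,
              ih _ _ (by omega)]
          by_cases hle : y - x ≤ x
          · rw [G_lt l dn hlt hle]
            by_cases h2 : x - 1 = y - 2
            · rw [G_eq l dn h2, show y - x = 1 by omega]
              rfl
            · rw [G_lt l dn (show x - 1 < y - 2 by omega)
                    (show y - 2 - (x - 1) ≤ x - 1 by omega),
                  show y - 2 - (x - 1) = y - x - 1 by omega,
                  show x - 1 - (y - x - 1) = x - (y - x) by omega,
                  cons_replicate, show y - x - 1 + 1 = y - x by omega]
          · rw [G_lt' l dn hlt hle,
                G_lt' l dn (show x - 1 < y - 2 by omega)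
                  (show ¬ y - 2 - (x - 1) ≤ x - 1 by omega),
                show y - 2 - 2 * (x - 1) = y - 2 * x by omega,
                cons_replicate, show x - 1 + 1 = x by omega]
    · simp only [dif_neg h]
      unfold G
      rcases Nat.eq_zero_or_pos x with hx | hx
      · subst hx
        rcases Nat.eq_zero_or_pos y with hy | hy
        · subst hy; simp
        · rw [if_neg (show ¬ 0 > y by omega), if_pos hy,
              if_neg (show ¬ y - 0 ≤ 0 by omega)]
          simp
      · have hy : y = 0 := by omega
        subst hy
        rw [if_pos hx, if_neg (show ¬ x - 0 ≤ 0 by omega)]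
        simp

-- ===== VERDICT (by name: the statement is the Claim_ definition above) =====
theorem dir_to_camera_moves_py_spec : Claim_equal_dir_to_camera_moves_py := by
  intro dir _
  unfold Spec_dir_to_camera_moves_py dir_to_camera_moves_py dir_to_camera_moves_py_alt
  dsimp only
  set l : Bool := decide (dir.1 < 0) with hl
  set dn : Bool := decide (dir.2 < 0) with hdn
  set a := dir.1.natAbs with ha
  set b := dir.2.natAbs with hb
  rw [dirCamLoop_eq l dn (a + b) a b (le_refl _) []]
  have hd : ((a : Int) - (b : Int)).natAbs = max a b - min a b := by omega
  simp only [hd]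
  by_cases hgt : a > b
  · rw [if_pos hgt, show max a b = a by omega, show min a b = b by omega]
    by_cases hle : a - b ≤ b
    · rw [G_gt l dn hgt hle [], if_pos hle, show min (a - b) b = a - b by omega]
      simp [dB, lxB]
    · rw [G_gt' l dn hgt hle [], if_neg hle, show min (a - b) b = b by omega,
          if_pos hgt]
      have h1 : ¬ (a - 2 * b = 0 ∧ (0:Nat) = 0) := by omega
      rw [if_neg h1, if_pos (show a - 2 * b ≠ 0 by omega),
          show a - b - b = a - 2 * b by omega]
      simp [lxB]
  · rw [if_neg hgt]
    by_cases hlt : a < b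
    · rw [if_pos hlt, show max a b = b by omega, show min a b = a by omega]
      by_cases hle : b - a ≤ a
      · rw [G_lt l dn hlt hle [], if_pos hle, show min (b - a) a = b - a by omega]
        simp [dB, lyB]
      · rw [G_lt' l dn hlt hle [], if_neg hle, show min (b - a) a = a by omega,
            if_neg hgt]
        have h1 : ¬ ((0:Nat) = 0 ∧ b - 2 * a = 0) := by omega
        rw [if_neg h1, if_neg (show ¬ (0:Nat) ≠ 0 by omega),
            show b - a - a = b - 2 * a by omega]
        simp [lyB]
    · have hab : a = b := by omega
      rw [if_neg hlt, G_eq l dn hab [],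
          show max a b - min a b = 0 by omega,
          if_pos (show (0:Nat) ≤ min a b by omega),
          show min a b - 0 = min a b by omega,
          show min a b = a by omega]
      simp [dB]
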